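-- pv_equiv track=rewrite | github.com/AlgoMathITMO/public-transport-network | ptn/preprocessing/osm.py | is_sport
-- ===== SOURCE A (Python) =====
-- from typing import List, Tuple, Dict, Optional, Set
--
-- def is_any_pair_present(tags: dict, items: List[Tuple[str, str]]) -> bool:
--     return isinstance(tags, dict) \
--            and any((key, value) in items for key, value in tags.items())
--
-- def is_any_key_present(tags: dict, keys: List[str]) -> bool:
--     return isinstance(tags, dict) and any(key in tags.keys() for key in keys)
--
-- def is_sport(tags: dict) -> bool:
--     items = [
--         ('club', 'sport'),
--     ]
--     items += [('leisure', val) for val in ['fitness_centre', 'swimming_pool', 'sports_centre',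
--                                            'club', 'horse_riding', 'marina', 'stadium', 'dance']]
--     items += [('shop', val) for val in ['sports', 'sport']]
--     items += [('amenity', val) for val in ['sports_centre', 'sport_school']]
--
--     return is_any_key_present(tags, ['sport']) or is_any_pair_present(tags, items)
-- ===== SOURCE B (Python) =====
-- def is_sport(tags: dict) -> bool:
--     if not isinstance(tags, dict):
--         return False
--     return ('sport' in tags
--             or tags.get('club') == 'sport'
--             or tags.get('leisure') in {'fitness_centre', 'swimming_pool', 'sports_centre',
--                                        'club', 'horse_riding', 'marina', 'stadium', 'dance'}
--             or tags.get('shop') in {'sports', 'sport'}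
--             or tags.get('amenity') in {'sports_centre', 'sport_school'})
-- ===== Notes on version B (the rewrite author's own statement) =====
-- stated objective: faster
-- what changed: Instead of building a 13-pair list and scanning every tag of the dict against it, B probes the five relevant keys directly with dict.get against constant sets, so the dict is never iterated.
import Mathlib
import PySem

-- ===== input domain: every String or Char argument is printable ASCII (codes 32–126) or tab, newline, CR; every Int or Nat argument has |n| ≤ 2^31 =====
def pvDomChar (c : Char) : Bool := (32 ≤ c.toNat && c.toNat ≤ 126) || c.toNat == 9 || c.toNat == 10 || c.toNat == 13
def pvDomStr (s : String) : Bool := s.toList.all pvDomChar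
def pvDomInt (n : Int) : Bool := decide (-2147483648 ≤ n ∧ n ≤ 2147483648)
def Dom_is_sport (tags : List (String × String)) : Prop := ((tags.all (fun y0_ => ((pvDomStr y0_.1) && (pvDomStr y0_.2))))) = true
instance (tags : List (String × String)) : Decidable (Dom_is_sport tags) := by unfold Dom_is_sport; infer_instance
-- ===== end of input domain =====

-- B replaces A's scan of every tag against a 13-pair list by five direct key probes against constant sets (faster: the dict is never iterated).

-- ===== PORT A =====
def is_any_pair_present (tags : List (String × String)) (items : List (String × String)) : Bool :=
  tags.any (fun kv => items.contains kv)

def is_any_key_present (tags : List (String × String)) (keys : List String) : Bool :=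
  keys.any (fun k => (tags.map Prod.fst).contains k)

def is_sport (tags : List (String × String)) : Bool :=
  let items : List (String × String) :=
    [("club", "sport")]
    ++ (["fitness_centre", "swimming_pool", "sports_centre",
         "club", "horse_riding", "marina", "stadium", "dance"].map (fun v => ("leisure", v)))
    ++ (["sports", "sport"].map (fun v => ("shop", v)))
    ++ (["sports_centre", "sport_school"].map (fun v => ("amenity", v)))
  is_any_key_present tags ["sport"] || is_any_pair_present tags items

-- ===== PORT B =====
-- tags.get(k) on a dict = first (unique) binding of k in the association list: List.lookup
def is_sport_alt (tags : List (String × String)) : Bool :=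
  (tags.lookup "sport").isSome
  || tags.lookup "club" == some "sport"
  || (tags.lookup "leisure").any (fun v =>
       ["fitness_centre", "swimming_pool", "sports_centre",
        "club", "horse_riding", "marina", "stadium", "dance"].contains v)
  || (tags.lookup "shop").any (fun v => ["sports", "sport"].contains v)
  || (tags.lookup "amenity").any (fun v => ["sports_centre", "sport_school"].contains v)

-- ===== PRECONDITION & SPEC =====
-- A Python dict has unique keys, so an association list with a duplicated key represents no
-- actual input of A; Pre_ excludes exactly those lists (no dict input is excluded).
def Pre_is_sport (tags : List (String × String)) : Prop := (tags.map Prod.fst).Nodup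
instance (tags : List (String × String)) : Decidable (Pre_is_sport tags) := by unfold Pre_is_sport; infer_instance

def pvWitness_is_sport : (List (String × String)) := [("sport", "yes"), ("name", "gym")]

def Spec_is_sport (tags : List (String × String)) (out : Bool) : Prop := out = is_sport_alt tags
instance (tags : List (String × String)) (out : Bool) : Decidable (Spec_is_sport tags out) := by unfold Spec_is_sport; infer_instance

-- ===== CLAIM (what is proved, stated in full; the proofs are below) =====
def Claim_equal_is_sport : Prop := ∀ (tags : List (String × String)), Dom_is_sport tags → Pre_is_sport tags → Spec_is_sport tags (is_sport tags)

-- ===== LEMMAS AND PROOFS =====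

-- k occurs among the keys iff lookup finds it
theorem pv_lookup_isSome (tags : List (String × String)) (k : String) :
    (tags.lookup k).isSome = true ↔ k ∈ tags.map Prod.fst := by
  induction tags with
  | nil => simp [List.lookup]
  | cons a t ih =>
    obtain ⟨a1, a2⟩ := a
    simp only [List.lookup, List.map_cons, List.mem_cons]
    by_cases h : k = a1
    · simp [h]
    · have hb : (k == a1) = false := by simp [h]
      rw [hb]
      simp only [ih]
      constructor
      · exact Or.inr
      · rintro (h' | h')
        · exact absurd h' h
        · exact h'

-- with unique keys, a pair is a member iff lookup of its key returns its value
theorem pv_lookup_eq_some (tags : List (String × String)) (hnd : (tags.map Prod.fst).Nodup)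
    (k v : String) : tags.lookup k = some v ↔ (k, v) ∈ tags := by
  induction tags with
  | nil => simp [List.lookup]
  | cons a t ih =>
    obtain ⟨a1, a2⟩ := a
    simp only [List.map_cons, List.nodup_cons] at hnd
    simp only [List.lookup, List.mem_cons]
    by_cases h : k = a1
    · subst h
      simp only [beq_self_eq_true]
      constructor
      · rintro h'
        left
        simp only [Option.some.injEq] at h'
        simp [h']
      · rintro (h' | h')
        · simp only [Prod.mk.injEq] at h'
          simp [h'.2]
        · exact absurd (List.mem_map_of_mem (f := Prod.fst) h') (by simpa using hnd.1)
    · have hb : (k == a1) = false := by simp [h]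
      rw [hb]
      rw [ih hnd.2]
      constructor
      · exact Or.inr
      · rintro (h' | h')
        · exact absurd (congrArg Prod.fst h') h
        · exact h'

theorem pv_is_sport_eq (tags : List (String × String)) (hnd : (tags.map Prod.fst).Nodup) :
    is_sport tags = is_sport_alt tags := by
  rw [Bool.eq_iff_iff]
  simp only [is_sport, is_any_key_present, is_any_pair_present, is_sport_alt,
    List.any_eq_true, List.any_cons, List.any_nil, Bool.or_eq_true, Bool.or_false,
    List.contains_eq_mem, List.map_cons, List.map_nil, List.mem_cons,
    List.cons_append, List.nil_append, decide_eq_true_eq,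
    Option.any_eq_true, beq_iff_eq, Option.isSome_iff_exists,
    List.not_mem_nil, or_false]
  constructor
  · rintro (hk | ⟨⟨k, v⟩, hmem, hin⟩)
    · have h1 := (pv_lookup_isSome tags "sport").2 hk
      rcases Option.isSome_iff_exists.1 h1 with ⟨a, ha⟩
      exact Or.inl (Or.inl (Or.inl (Or.inl ⟨a, ha⟩)))
    · rcases hin with h|h|h|h|h|h|h|h|h|h|h|h|h
      all_goals
        rw [Prod.mk.injEq] at h
      all_goals
        obtain ⟨rfl, rfl⟩ := h
      all_goals
        have hl := (pv_lookup_eq_some tags hnd _ _).2 hmem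
      all_goals
        simp [hl]
  · rintro ((((⟨a, ha⟩ | hc) | ⟨y, hy, hin⟩) | ⟨y, hy, hin⟩) | ⟨y, hy, hin⟩)
    · exact Or.inl ((pv_lookup_isSome tags "sport").1 (by simp [ha]))
    · exact Or.inr ⟨("club", "sport"), (pv_lookup_eq_some tags hnd _ _).1 hc, by simp⟩
    · refine Or.inr ⟨("leisure", y), (pv_lookup_eq_some tags hnd _ _).1 hy, ?_⟩
      rcases hin with rfl|rfl|rfl|rfl|rfl|rfl|rfl|rfl <;> simp
    · refine Or.inr ⟨("shop", y), (pv_lookup_eq_some tags hnd _ _).1 hy, ?_⟩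
      rcases hin with rfl|rfl <;> simp
    · refine Or.inr ⟨("amenity", y), (pv_lookup_eq_some tags hnd _ _).1 hy, ?_⟩
      rcases hin with rfl|rfl <;> simp

-- ===== VERDICT (by name: the statement is the Claim_ definition above) =====
theorem is_sport_spec : Claim_equal_is_sport := by
  intro tags _ hpre
  exact pv_is_sport_eq tags hpre
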